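-- pv_equiv track=rewrite | github.com/CS-Dinero/options-ai-assistant | command/priority_stack_engine.py | build_priority_stack
-- ===== SOURCE A (Python) =====
-- from typing import Any
--
-- BAND_ORDER={"ACT_NOW":0,"DECIDE_NOW":1,"WATCH_CLOSELY":2,"IMPROVE_LATER":3}
--
-- def build_priority_stack(executive_state: dict[str,Any]) -> list[dict[str,Any]]:
--     items=[]
--     for a in executive_state.get("alerts",[]):
--         items.append({"priority_band":"ACT_NOW" if a.get("severity")=="CRITICAL" else "WATCH_CLOSELY",
--                       "title":a.get("summary","Alert"),"source_type":"ALERT"})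
--     for r in executive_state.get("reviews",[]):
--         if r.get("priority") in ("P0","P1"):
--             items.append({"priority_band":"DECIDE_NOW","title":r.get("title","Urgent review"),"source_type":"REVIEW"})
--     for r in executive_state.get("releases",[]):
--         if r.get("state") not in ("COMPLETED","CANCELLED"):
--             items.append({"priority_band":"WATCH_CLOSELY","title":r.get("title","Release bundle"),"source_type":"RELEASE"})
--     items.sort(key=lambda x: BAND_ORDER.get(x["priority_band"],99))
--     return items
-- ===== SOURCE B (Python) =====
-- def build_priority_stack(executive_state):
--     # Build the result directly in band order with per-band comprehensions
--     # (stable, insertion order within each band) instead of build-then-sort.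
--     alerts = executive_state.get("alerts", [])
--     reviews = executive_state.get("reviews", [])
--     releases = executive_state.get("releases", [])
--     act = [{"priority_band": "ACT_NOW", "title": a.get("summary", "Alert"), "source_type": "ALERT"}
--            for a in alerts if a.get("severity") == "CRITICAL"]
--     decide = [{"priority_band": "DECIDE_NOW", "title": r.get("title", "Urgent review"), "source_type": "REVIEW"}
--               for r in reviews if r.get("priority") in ("P0", "P1")]
--     watch = [{"priority_band": "WATCH_CLOSELY", "title": a.get("summary", "Alert"), "source_type": "ALERT"}
--              for a in alerts if a.get("severity") != "CRITICAL"] + \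
--             [{"priority_band": "WATCH_CLOSELY", "title": r.get("title", "Release bundle"), "source_type": "RELEASE"}
--              for r in releases if r.get("state") not in ("COMPLETED", "CANCELLED")]
--     return act + decide + watch
-- ===== Notes on version B (the rewrite author's own statement) =====
-- stated objective: alternative
-- what changed: replaces the build-then-stable-sort (keyed by a band table) with per-band filter/map comprehensions emitted directly in band order and concatenated, eliminating the sort
import Mathlib
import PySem

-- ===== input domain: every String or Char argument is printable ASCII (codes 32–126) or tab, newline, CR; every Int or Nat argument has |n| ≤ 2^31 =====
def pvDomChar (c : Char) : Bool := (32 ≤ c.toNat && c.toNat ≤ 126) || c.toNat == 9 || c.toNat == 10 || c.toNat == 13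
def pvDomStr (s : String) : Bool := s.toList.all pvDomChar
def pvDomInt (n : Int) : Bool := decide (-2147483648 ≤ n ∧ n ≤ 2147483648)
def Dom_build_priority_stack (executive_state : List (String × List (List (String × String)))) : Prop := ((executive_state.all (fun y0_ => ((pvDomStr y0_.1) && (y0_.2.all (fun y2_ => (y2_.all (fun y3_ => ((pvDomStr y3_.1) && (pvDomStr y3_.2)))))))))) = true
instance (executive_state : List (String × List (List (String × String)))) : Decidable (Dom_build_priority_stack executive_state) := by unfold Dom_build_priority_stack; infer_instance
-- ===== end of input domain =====

-- B replaces build-then-stable-sort with per-band filter/map comprehensions concatenated in band order (objective: alternative).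

-- ===== PORT A =====
-- the {"priority_band": b, "title": t, "source_type": s} dict literal A builds
def pvItem (b t s : String) : List (String × String) :=
  [("priority_band", b), ("title", t), ("source_type", s)]

def pvBandOrder : PySem.Dict String Int :=
  PySem.Dict.mk [("ACT_NOW", 0), ("DECIDE_NOW", 1), ("WATCH_CLOSELY", 2), ("IMPROVE_LATER", 3)]

-- sort key: BAND_ORDER.get(x["priority_band"], 99); every item A sorts carries the
-- "priority_band" key, so the "" default of the inner lookup is unreachable there (exact on A's items)
def pvKey (x : List (String × String)) : Int :=
  pvBandOrder.getD (PySem.Dict.getD (PySem.Dict.mk x) "priority_band" "") 99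

def build_priority_stack (executive_state : List (String × List (List (String × String)))) : List (List (String × String)) :=
  let items : List (List (String × String)) := []
  let items := (PySem.Dict.getD (PySem.Dict.mk executive_state) "alerts" []).foldl
    (fun items a => items ++ [pvItem
        (if PySem.Dict.get? (PySem.Dict.mk a) "severity" == some "CRITICAL" then "ACT_NOW" else "WATCH_CLOSELY")
        (PySem.Dict.getD (PySem.Dict.mk a) "summary" "Alert") "ALERT"]) items
  let items := (PySem.Dict.getD (PySem.Dict.mk executive_state) "reviews" []).foldl
    (fun items r => if PySem.Dict.get? (PySem.Dict.mk r) "priority" == some "P0"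
                      || PySem.Dict.get? (PySem.Dict.mk r) "priority" == some "P1"
      then items ++ [pvItem "DECIDE_NOW" (PySem.Dict.getD (PySem.Dict.mk r) "title" "Urgent review") "REVIEW"]
      else items) items
  let items := (PySem.Dict.getD (PySem.Dict.mk executive_state) "releases" []).foldl
    (fun items r => if !(PySem.Dict.get? (PySem.Dict.mk r) "state" == some "COMPLETED"
                      || PySem.Dict.get? (PySem.Dict.mk r) "state" == some "CANCELLED")
      then items ++ [pvItem "WATCH_CLOSELY" (PySem.Dict.getD (PySem.Dict.mk r) "title" "Release bundle") "RELEASE"]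
      else items) items
  PySem.List.sorted items pvKey

-- ===== PORT B =====
-- each Python list comprehension [f(x) for x in xs if p(x)] is ported as (xs.filter p).map f
def build_priority_stack_alt (executive_state : List (String × List (List (String × String)))) : List (List (String × String)) :=
  let alerts := PySem.Dict.getD (PySem.Dict.mk executive_state) "alerts" []
  let reviews := PySem.Dict.getD (PySem.Dict.mk executive_state) "reviews" []
  let releases := PySem.Dict.getD (PySem.Dict.mk executive_state) "releases" []
  let act := (alerts.filter (fun a => PySem.Dict.get? (PySem.Dict.mk a) "severity" == some "CRITICAL")).map
    (fun a => [("priority_band", "ACT_NOW"), ("title", PySem.Dict.getD (PySem.Dict.mk a) "summary" "Alert"), ("source_type", "ALERT")])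
  let decide := (reviews.filter (fun r => PySem.Dict.get? (PySem.Dict.mk r) "priority" == some "P0"
      || PySem.Dict.get? (PySem.Dict.mk r) "priority" == some "P1")).map
    (fun r => [("priority_band", "DECIDE_NOW"), ("title", PySem.Dict.getD (PySem.Dict.mk r) "title" "Urgent review"), ("source_type", "REVIEW")])
  let watch := (alerts.filter (fun a => !(PySem.Dict.get? (PySem.Dict.mk a) "severity" == some "CRITICAL"))).map
    (fun a => [("priority_band", "WATCH_CLOSELY"), ("title", PySem.Dict.getD (PySem.Dict.mk a) "summary" "Alert"), ("source_type", "ALERT")])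
    ++ (releases.filter (fun r => !(PySem.Dict.get? (PySem.Dict.mk r) "state" == some "COMPLETED"
      || PySem.Dict.get? (PySem.Dict.mk r) "state" == some "CANCELLED"))).map
    (fun r => [("priority_band", "WATCH_CLOSELY"), ("title", PySem.Dict.getD (PySem.Dict.mk r) "title" "Release bundle"), ("source_type", "RELEASE")])
  act ++ decide ++ watch

-- ===== PRECONDITION & SPEC =====
def Spec_build_priority_stack (executive_state : List (String × List (List (String × String)))) (out : List (List (String × String))) : Prop := out = build_priority_stack_alt executive_state
instance (executive_state : List (String × List (List (String × String)))) (out : List (List (String × String))) : Decidable (Spec_build_priority_stack executive_state out) := by unfold Spec_build_priority_stack; infer_instance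

-- ===== CLAIM (what is proved, stated in full; the proofs are below) =====
def Claim_equal_build_priority_stack : Prop := ∀ (executive_state : List (String × List (List (String × String)))), Dom_build_priority_stack executive_state → Spec_build_priority_stack executive_state (build_priority_stack executive_state)

-- ===== LEMMAS AND PROOFS =====

-- abbreviations for the three tests and the three item builders
def pvCrit (a : List (String × String)) : Bool :=
  PySem.Dict.get? (PySem.Dict.mk a) "severity" == some "CRITICAL"
def pvPr (r : List (String × String)) : Bool :=
  PySem.Dict.get? (PySem.Dict.mk r) "priority" == some "P0"
    || PySem.Dict.get? (PySem.Dict.mk r) "priority" == some "P1"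
def pvSt (r : List (String × String)) : Bool :=
  !(PySem.Dict.get? (PySem.Dict.mk r) "state" == some "COMPLETED"
    || PySem.Dict.get? (PySem.Dict.mk r) "state" == some "CANCELLED")
def pvGA (a : List (String × String)) : List (String × String) :=
  pvItem (if pvCrit a then "ACT_NOW" else "WATCH_CLOSELY") (PySem.Dict.getD (PySem.Dict.mk a) "summary" "Alert") "ALERT"
def pvG1 (r : List (String × String)) : List (String × String) :=
  pvItem "DECIDE_NOW" (PySem.Dict.getD (PySem.Dict.mk r) "title" "Urgent review") "REVIEW"
def pvG2 (r : List (String × String)) : List (String × String) :=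
  pvItem "WATCH_CLOSELY" (PySem.Dict.getD (PySem.Dict.mk r) "title" "Release bundle") "RELEASE"

theorem pvKey_item (b t s : String) : pvKey (pvItem b t s) = pvBandOrder.getD b 99 := by
  simp [pvKey, pvItem, PySem.Dict.getD, PySem.Dict.get?_mk_cons]

theorem pvKey_GA (a : List (String × String)) : pvKey (pvGA a) = if pvCrit a then 0 else 2 := by
  by_cases h : pvCrit a <;> simp [pvGA, h, pvKey_item, pvBandOrder, PySem.Dict.getD, PySem.Dict.get?_mk_cons]

theorem pvKey_G1 (r : List (String × String)) : pvKey (pvG1 r) = 1 := by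
  simp [pvG1, pvKey_item, pvBandOrder, PySem.Dict.getD, PySem.Dict.get?_mk_cons]

theorem pvKey_G2 (r : List (String × String)) : pvKey (pvG2 r) = 2 := by
  simp [pvG2, pvKey_item, pvBandOrder, PySem.Dict.getD, PySem.Dict.get?_mk_cons]

-- insertBy facts
theorem insertBy_nil {α : Type} (bf : α → α → Bool) (x : α) :
    PySem.List.insertBy bf x [] = [x] := by simp [PySem.List.insertBy]

theorem insertBy_cons_before {α : Type} (bf : α → α → Bool) (x y : α) (t : List α)
    (h : bf x y = true) : PySem.List.insertBy bf x (y :: t) = x :: y :: t := by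
  simp [PySem.List.insertBy, h]

theorem insertBy_append_skip {α : Type} (bf : α → α → Bool) (x : α) (l r : List α)
    (h : ∀ y ∈ l, bf x y = false) :
    PySem.List.insertBy bf x (l ++ r) = l ++ PySem.List.insertBy bf x r := by
  induction l with
  | nil => simp
  | cons y t ih =>
      have hy : bf x y = false := h y (by simp)
      simp only [List.cons_append, PySem.List.insertBy, hy]
      simp only [Bool.false_eq_true, if_false]
      rw [ih (fun z hz => h z (by simp [hz]))]

-- a stable sort whose keys all lie in {0,1,2} is the concatenation of the three band buckets
theorem sorted_banded {α : Type} (key : α → Int) (l : List α)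
    (h : ∀ x ∈ l, key x = 0 ∨ key x = 1 ∨ key x = 2) :
    PySem.List.sorted l key =
      l.filter (fun x => key x == 0) ++ l.filter (fun x => key x == 1) ++ l.filter (fun x => key x == 2) := by
  induction l using List.reverseRecOn with
  | nil => simp [PySem.List.sorted]
  | append_singleton l x ih =>
      have hl : ∀ y ∈ l, key y = 0 ∨ key y = 1 ∨ key y = 2 := fun y hy => h y (by simp [hy])
      have hx := h x (by simp)
      rw [PySem.List.sorted_eq_foldl_insertBy] at ih ⊢
      rw [List.foldl_append, List.foldl_cons, List.foldl_nil, ih hl]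
      set bf : α → α → Bool := fun a b => decide (key a < key b) with hbf
      have mem0 : ∀ y ∈ l.filter (fun x => key x == 0), key y = 0 := by
        intro y hy; simpa using (List.mem_filter.mp hy).2
      have mem1 : ∀ y ∈ l.filter (fun x => key x == 1), key y = 1 := by
        intro y hy; simpa using (List.mem_filter.mp hy).2
      have mem2 : ∀ y ∈ l.filter (fun x => key x == 2), key y = 2 := by
        intro y hy; simpa using (List.mem_filter.mp hy).2
      rcases hx with hx | hx | hx
      · -- key x = 0 : goes right after bucket 0
        rw [List.append_assoc,
            insertBy_append_skip bf x _ _ (fun y hy => by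
              simp [hbf, mem0 y hy, hx])]
        have hstep : PySem.List.insertBy bf x
            (l.filter (fun x => key x == 1) ++ l.filter (fun x => key x == 2)) =
            x :: (l.filter (fun x => key x == 1) ++ l.filter (fun x => key x == 2)) := by
          cases hc : l.filter (fun x => key x == 1) ++ l.filter (fun x => key x == 2) with
          | nil => simpa [hc] using insertBy_nil bf x
          | cons c t =>
              have hcmem : c ∈ l.filter (fun x => key x == 1) ++ l.filter (fun x => key x == 2) := by
                simp [hc]
              have hck : key c = 1 ∨ key c = 2 := by
                rcases List.mem_append.mp hcmem with hm | hm
                · exact Or.inl (mem1 c hm)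
                · exact Or.inr (mem2 c hm)
              refine insertBy_cons_before bf x c t ?_
              rcases hck with hck | hck <;> simp [hbf, hck, hx]
        rw [hstep]
        simp [List.filter_append, hx]
      · -- key x = 1 : goes right after bucket 1
        rw [List.append_assoc,
            insertBy_append_skip bf x _ _ (fun y hy => by
              simp [hbf, mem0 y hy, hx]),
            insertBy_append_skip bf x _ _ (fun y hy => by
              simp [hbf, mem1 y hy, hx])]
        have hstep : PySem.List.insertBy bf x (l.filter (fun x => key x == 2)) =
            x :: l.filter (fun x => key x == 2) := by
          cases hc : l.filter (fun x => key x == 2) with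
          | nil => simpa [hc] using insertBy_nil bf x
          | cons c t =>
              have hck : key c = 2 := mem2 c (by simp [hc])
              exact insertBy_cons_before bf x c t (by simp [hbf, hck, hx])
        rw [hstep]
        simp [List.filter_append, hx]
      · -- key x = 2 : goes at the very end
        rw [PySem.List.insertBy_of_forall_not_before bf x _ (fun y hy => by
          have hyl : y ∈ l := by
            rcases List.mem_append.mp hy with hm | hm
            · rcases List.mem_append.mp hm with hm' | hm'
              · exact (List.mem_filter.mp hm').1
              · exact (List.mem_filter.mp hm').1
            · exact (List.mem_filter.mp hm).1
          rcases hl y hyl with h0 | h0 | h0 <;> simp [hbf, h0, hx])]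
        simp [List.filter_append, hx]

-- A's three loops
theorem foldA (al : List (List (String × String))) (acc : List (List (String × String))) :
    al.foldl (fun items a => items ++ [pvItem
        (if PySem.Dict.get? (PySem.Dict.mk a) "severity" == some "CRITICAL" then "ACT_NOW" else "WATCH_CLOSELY")
        (PySem.Dict.getD (PySem.Dict.mk a) "summary" "Alert") "ALERT"]) acc = acc ++ al.map pvGA := by
  induction al generalizing acc with
  | nil => simp
  | cons a t ih => rw [List.foldl_cons, ih]; simp [pvGA, pvCrit]

theorem foldR (rl : List (List (String × String))) (acc : List (List (String × String))) :
    rl.foldl (fun items r => if PySem.Dict.get? (PySem.Dict.mk r) "priority" == some "P0"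
                      || PySem.Dict.get? (PySem.Dict.mk r) "priority" == some "P1"
      then items ++ [pvItem "DECIDE_NOW" (PySem.Dict.getD (PySem.Dict.mk r) "title" "Urgent review") "REVIEW"]
      else items) acc = acc ++ (rl.filter pvPr).map pvG1 := by
  induction rl generalizing acc with
  | nil => simp
  | cons r t ih =>
      rw [List.foldl_cons]
      by_cases h : pvPr r
      · rw [if_pos (by simpa [pvPr] using h), ih]
        simp [h, pvG1]
      · rw [if_neg (by simpa [pvPr] using h), ih]
        simp [h]

theorem foldL (rl : List (List (String × String))) (acc : List (List (String × String))) :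
    rl.foldl (fun items r => if !(PySem.Dict.get? (PySem.Dict.mk r) "state" == some "COMPLETED"
                      || PySem.Dict.get? (PySem.Dict.mk r) "state" == some "CANCELLED")
      then items ++ [pvItem "WATCH_CLOSELY" (PySem.Dict.getD (PySem.Dict.mk r) "title" "Release bundle") "RELEASE"]
      else items) acc = acc ++ (rl.filter pvSt).map pvG2 := by
  induction rl generalizing acc with
  | nil => simp
  | cons r t ih =>
      rw [List.foldl_cons]
      by_cases h : pvSt r
      · rw [if_pos (by simpa [pvSt] using h), ih]
        simp [h, pvG2]
      · rw [if_neg (by simpa [pvSt] using h), ih]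
        simp [h]

-- B's comprehensions, rewritten through the shared abbreviations
theorem altB (es : List (String × List (List (String × String)))) :
    build_priority_stack_alt es =
      ((PySem.Dict.getD (PySem.Dict.mk es) "alerts" []).filter pvCrit).map pvGA
      ++ ((PySem.Dict.getD (PySem.Dict.mk es) "reviews" []).filter pvPr).map pvG1
      ++ (((PySem.Dict.getD (PySem.Dict.mk es) "alerts" []).filter (fun a => !pvCrit a)).map pvGA
        ++ ((PySem.Dict.getD (PySem.Dict.mk es) "releases" []).filter pvSt).map pvG2) := by
  simp only [build_priority_stack_alt]
  have e1 : (fun a => PySem.Dict.get? (PySem.Dict.mk a) "severity" == some "CRITICAL") = pvCrit := rfl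
  have e2 : (fun r => PySem.Dict.get? (PySem.Dict.mk r) "priority" == some "P0"
      || PySem.Dict.get? (PySem.Dict.mk r) "priority" == some "P1") = pvPr := rfl
  have e3 : (fun a => !(PySem.Dict.get? (PySem.Dict.mk a) "severity" == some "CRITICAL")) = (fun a => !pvCrit a) := rfl
  have e4 : (fun r => !(PySem.Dict.get? (PySem.Dict.mk r) "state" == some "COMPLETED"
      || PySem.Dict.get? (PySem.Dict.mk r) "state" == some "CANCELLED")) = pvSt := rfl
  rw [e1, e2, e3, e4]
  have hA : ∀ xs : List (List (String × String)), (xs.filter pvCrit).map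
      (fun a => [("priority_band", "ACT_NOW"), ("title", PySem.Dict.getD (PySem.Dict.mk a) "summary" "Alert"), ("source_type", "ALERT")])
      = (xs.filter pvCrit).map pvGA := by
    intro xs
    refine List.map_congr_left ?_
    intro a ha
    have h : pvCrit a := by simpa using (List.mem_filter.mp ha).2
    simp [pvGA, pvItem, h]
  have hB : ∀ xs : List (List (String × String)), (xs.filter pvPr).map
      (fun r => [("priority_band", "DECIDE_NOW"), ("title", PySem.Dict.getD (PySem.Dict.mk r) "title" "Urgent review"), ("source_type", "REVIEW")])
      = (xs.filter pvPr).map pvG1 := by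
    intro xs
    refine List.map_congr_left ?_
    intro r _; simp [pvG1, pvItem]
  have hC : ∀ xs : List (List (String × String)), (xs.filter (fun a => !pvCrit a)).map
      (fun a => [("priority_band", "WATCH_CLOSELY"), ("title", PySem.Dict.getD (PySem.Dict.mk a) "summary" "Alert"), ("source_type", "ALERT")])
      = (xs.filter (fun a => !pvCrit a)).map pvGA := by
    intro xs
    refine List.map_congr_left ?_
    intro a ha
    have h : ¬ pvCrit a := by simpa using (List.mem_filter.mp ha).2
    simp [pvGA, pvItem, h]
  have hD : ∀ xs : List (List (String × String)), (xs.filter pvSt).map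
      (fun r => [("priority_band", "WATCH_CLOSELY"), ("title", PySem.Dict.getD (PySem.Dict.mk r) "title" "Release bundle"), ("source_type", "RELEASE")])
      = (xs.filter pvSt).map pvG2 := by
    intro xs
    refine List.map_congr_left ?_
    intro r _; simp [pvG2, pvItem]
  rw [hA, hB, hC, hD]

-- ===== VERDICT =====
theorem build_priority_stack_spec : Claim_equal_build_priority_stack := by
  intro es _
  unfold Spec_build_priority_stack
  rw [altB]
  simp only [build_priority_stack]
  rw [foldA, foldR, foldL]
  set al := PySem.Dict.getD (PySem.Dict.mk es) "alerts" [] with hal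
  set rv := PySem.Dict.getD (PySem.Dict.mk es) "reviews" [] with hrv
  set rl := PySem.Dict.getD (PySem.Dict.mk es) "releases" [] with hrl
  rw [List.nil_append, sorted_banded pvKey _ (by
    intro x hx
    rcases List.mem_append.mp hx with hm | hm
    · rcases List.mem_append.mp hm with hm' | hm'
      · obtain ⟨a, _, rfl⟩ := List.mem_map.mp hm'
        rw [pvKey_GA]; by_cases h : pvCrit a <;> simp [h]
      · obtain ⟨r, _, rfl⟩ := List.mem_map.mp hm'
        rw [pvKey_G1]; simp
    · obtain ⟨r, _, rfl⟩ := List.mem_map.mp hm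
      rw [pvKey_G2]; simp)]
  have f_mapGA : ∀ (i : Int), (al.map pvGA).filter (fun x => pvKey x == i)
      = (al.filter (fun a => pvKey (pvGA a) == i)).map pvGA := by
    intro i; rw [List.filter_map]; rfl
  have f_mapG1 : ∀ (i : Int), i ≠ 1 → ((rv.filter pvPr).map pvG1).filter (fun x => pvKey x == i) = [] := by
    intro i hi
    refine List.filter_eq_nil_iff.mpr ?_
    intro y hy
    obtain ⟨r, _, rfl⟩ := List.mem_map.mp hy
    simp only [pvKey_G1, beq_iff_eq]
    omega
  have f_mapG2 : ∀ (i : Int), i ≠ 2 → ((rl.filter pvSt).map pvG2).filter (fun x => pvKey x == i) = [] := by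
    intro i hi
    refine List.filter_eq_nil_iff.mpr ?_
    intro y hy
    obtain ⟨r, _, rfl⟩ := List.mem_map.mp hy
    simp only [pvKey_G2, beq_iff_eq]
    omega
  simp only [List.filter_append, f_mapGA, f_mapG1 0 (by omega), f_mapG1 2 (by omega),
    f_mapG2 0 (by omega), f_mapG2 1 (by omega)]
  have h0 : al.filter (fun a => pvKey (pvGA a) == 0) = al.filter pvCrit := by
    refine List.filter_congr ?_
    intro a _; by_cases h : pvCrit a <;> simp [pvKey_GA, h]
  have h1 : al.filter (fun a => pvKey (pvGA a) == 1) = [] := by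
    refine List.filter_eq_nil_iff.mpr ?_
    intro a _; by_cases h : pvCrit a <;> simp [pvKey_GA, h]
  have h2 : al.filter (fun a => pvKey (pvGA a) == 2) = al.filter (fun a => !pvCrit a) := by
    refine List.filter_congr ?_
    intro a _; by_cases h : pvCrit a <;> simp [pvKey_GA, h]
  have hG1self : ((rv.filter pvPr).map pvG1).filter (fun x => pvKey x == 1) = (rv.filter pvPr).map pvG1 := by
    refine List.filter_eq_self.mpr ?_
    intro y hy
    obtain ⟨r, _, rfl⟩ := List.mem_map.mp hy
    simp [pvKey_G1]
  have hG2self : ((rl.filter pvSt).map pvG2).filter (fun x => pvKey x == 2) = (rl.filter pvSt).map pvG2 := by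
    refine List.filter_eq_self.mpr ?_
    intro y hy
    obtain ⟨r, _, rfl⟩ := List.mem_map.mp hy
    simp [pvKey_G2]
  rw [h0, h1, h2, hG1self, hG2self]
  simp
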